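-- pv_equiv track=rewrite | github.com/hectwilliams/AlgorithmBook | chapter10/python/chapter10.py | strings_loosely_interleaved
-- ===== SOURCE A (Python) =====
-- def strings_loosely_interleaved(str1, str2, str3, buffer = ""):
--
--   if bool(str1) ^ bool(str2):
--     return False
--
--   if buffer == str3:
--     return True
--
--   if not str1 and not str2:
--     return False
--
--   return strings_loosely_interleaved(str1[1 : : ], str2[1 : :] , str3, buffer + str1[0] + str2[0])
-- ===== SOURCE B (Python) =====
-- def strings_loosely_interleaved(str1, str2, str3, buffer=""):
--     # closed-form: at most one step count k can make the built prefix match str3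
--     if len(str3) < len(buffer) or (len(str3) - len(buffer)) % 2:
--         return False
--     k = (len(str3) - len(buffer)) // 2
--     limit = min(len(str1), len(str2))
--     if k > limit or (k == limit and len(str1) != len(str2)):
--         return False
--     inter = "".join(a + b for a, b in zip(str1[:k], str2[:k]))
--     return buffer + inter == str3
-- ===== Notes on version B (the rewrite author's own statement) =====
-- stated objective: faster
-- what changed: A recursively strips one char from str1/str2 per step while rebuilding the growing buffer string each step (quadratic); B computes the unique possible step count k = (len(str3)-len(buffer))/2 from the lengths, checks it is reachable, and does a single linear build-and-compare of buffer plus the interleaved k-prefix against str3.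
import Mathlib
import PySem

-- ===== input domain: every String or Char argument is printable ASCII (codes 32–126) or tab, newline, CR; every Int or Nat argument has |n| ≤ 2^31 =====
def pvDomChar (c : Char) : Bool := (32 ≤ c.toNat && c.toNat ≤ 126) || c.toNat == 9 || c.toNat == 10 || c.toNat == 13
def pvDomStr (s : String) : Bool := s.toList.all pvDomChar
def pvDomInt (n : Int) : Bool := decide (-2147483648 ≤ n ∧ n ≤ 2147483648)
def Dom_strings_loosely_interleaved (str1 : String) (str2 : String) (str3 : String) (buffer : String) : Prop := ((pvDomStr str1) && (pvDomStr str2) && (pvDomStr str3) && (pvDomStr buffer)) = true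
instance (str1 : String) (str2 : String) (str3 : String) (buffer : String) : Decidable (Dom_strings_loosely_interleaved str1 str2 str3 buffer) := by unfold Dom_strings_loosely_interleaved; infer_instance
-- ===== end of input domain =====

-- B replaces A's recursion (which rebuilds the growing buffer at every step) by computing the
-- single step count k that the lengths allow and doing one prefix construction + comparison.

-- ===== PORT A =====
-- A's recursion, step for step: the empty/non-empty mismatch cases are A's xor test (False),
-- the both-empty case checks buffer == str3 (True) then returns False, and the both-cons case
-- checks buffer == str3 (True) then recurses on the tails with buffer + str1[0] + str2[0].
def pvGoA : List Char → List Char → List Char → List Char → Bool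
  | [], _ :: _, _, _ => false
  | _ :: _, [], _, _ => false
  | [], [], s3, buf => if buf = s3 then true else false
  | a :: s1, b :: s2, s3, buf =>
      if buf = s3 then true else pvGoA s1 s2 s3 (buf ++ [a, b])

def strings_loosely_interleaved (str1 : String) (str2 : String) (str3 : String) (buffer : String) : Bool :=
  pvGoA str1.toList str2.toList str3.toList buffer.toList

-- ===== PORT B =====
-- literal port of Source B over List Char; the Nat subtraction len(str3) - len(buffer) is exact
-- because the first disjunct covers len(str3) < len(buffer) (where Python's value is negative
-- and the condition fires regardless of the modulus).
def pvGoB (s1 s2 s3 buf : List Char) : Bool :=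
  if s3.length < buf.length || (s3.length - buf.length) % 2 == 1 then false
  else
    let k := (s3.length - buf.length) / 2
    let limit := Nat.min s1.length s2.length
    if k > limit || (k == limit && !(s1.length == s2.length)) then false
    else
      let inter := ((s1.take k).zip (s2.take k)).flatMap (fun p => [p.1, p.2])
      decide (buf ++ inter = s3)

def strings_loosely_interleaved_alt (str1 : String) (str2 : String) (str3 : String) (buffer : String) : Bool :=
  pvGoB str1.toList str2.toList str3.toList buffer.toList

-- ===== PRECONDITION & SPEC =====
def Spec_strings_loosely_interleaved (str1 : String) (str2 : String) (str3 : String) (buffer : String) (out : Bool) : Prop := out = strings_loosely_interleaved_alt str1 str2 str3 buffer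
instance (str1 : String) (str2 : String) (str3 : String) (buffer : String) (out : Bool) : Decidable (Spec_strings_loosely_interleaved str1 str2 str3 buffer out) := by unfold Spec_strings_loosely_interleaved; infer_instance

-- ===== CLAIM (what is proved, stated in full; the proofs are below) =====
def Claim_equal_strings_loosely_interleaved : Prop := ∀ (str1 : String) (str2 : String) (str3 : String) (buffer : String), Dom_strings_loosely_interleaved str1 str2 str3 buffer → Spec_strings_loosely_interleaved str1 str2 str3 buffer (strings_loosely_interleaved str1 str2 str3 buffer)

-- ===== LEMMAS AND PROOFS =====

lemma pvGoB_nil_nil (s3 buf : List Char) : pvGoB [] [] s3 buf = decide (buf = s3) := by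
  unfold pvGoB
  simp only [List.length_nil, Nat.min_self, List.take_nil, List.zip_nil_left, List.flatMap_nil,
    List.append_nil]
  by_cases h : buf = s3
  · subst h; simp
  · simp [h]

lemma pvGoB_nil_cons (b : Char) (s2 s3 buf : List Char) : pvGoB [] (b :: s2) s3 buf = false := by
  unfold pvGoB
  simp

lemma pvGoB_cons_nil (a : Char) (s1 s3 buf : List Char) : pvGoB (a :: s1) [] s3 buf = false := by
  unfold pvGoB
  simp

lemma pvGoB_cons_cons (a b : Char) (s1 s2 s3 buf : List Char) :
    pvGoB (a :: s1) (b :: s2) s3 buf =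
      if buf = s3 then true else pvGoB s1 s2 s3 (buf ++ [a, b]) := by
  by_cases h : buf = s3
  · subst h; unfold pvGoB; simp
  · rw [if_neg h]
    unfold pvGoB
    have hb : (buf ++ [a, b]).length = buf.length + 2 := by simp
    rw [hb]
    rcases Nat.lt_or_ge s3.length (buf.length + 2) with hlt | hge
    · have hC1' : (decide (s3.length < buf.length + 2)
          || (s3.length - (buf.length + 2)) % 2 == 1) = true := by simp [hlt]
      rw [hC1']
      rcases (show s3.length < buf.length ∨ (s3.length - buf.length) % 2 = 1
          ∨ s3.length = buf.length by omega) with hlow | hodd1 | heq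
      · have hC1 : (decide (s3.length < buf.length)
            || (s3.length - buf.length) % 2 == 1) = true := by simp [hlow]
        rw [hC1]; simp
      · have hC1 : (decide (s3.length < buf.length)
            || (s3.length - buf.length) % 2 == 1) = true := by simp [hodd1]
        rw [hC1]; simp
      · have hC1 : (decide (s3.length < buf.length)
            || (s3.length - buf.length) % 2 == 1) = false := by simp [heq]
        have hk : (s3.length - buf.length) / 2 = 0 := by omega
        rw [hC1, hk]
        simp [h]
    · by_cases hodd : (s3.length - buf.length) % 2 = 1
      · have hC1 : (decide (s3.length < buf.length)
            || (s3.length - buf.length) % 2 == 1) = true := by simp [hodd]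
        have hC1' : (decide (s3.length < buf.length + 2)
            || (s3.length - (buf.length + 2)) % 2 == 1) = true := by simp; omega
        rw [hC1, hC1']; simp
      · have hC1 : (decide (s3.length < buf.length)
            || (s3.length - buf.length) % 2 == 1) = false := by simp; omega
        have hC1' : (decide (s3.length < buf.length + 2)
            || (s3.length - (buf.length + 2)) % 2 == 1) = false := by simp; omega
        have hk : (s3.length - buf.length) / 2 = (s3.length - (buf.length + 2)) / 2 + 1 := by
          omega
        rw [hC1, hC1', hk]
        simp only [Bool.false_eq_true, if_false, List.length_cons, Nat.succ_min_succ,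
          List.take_succ_cons, List.zip_cons_cons, List.flatMap_cons]
        have hg : (decide ((s3.length - (buf.length + 2)) / 2 + 1 > s1.length.min s2.length + 1)
              || ((s3.length - (buf.length + 2)) / 2 + 1 == s1.length.min s2.length + 1
                   && !(s1.length + 1 == s2.length + 1)))
            = (decide ((s3.length - (buf.length + 2)) / 2 > s1.length.min s2.length)
              || ((s3.length - (buf.length + 2)) / 2 == s1.length.min s2.length
                   && !(s1.length == s2.length))) := by
          simp
        rw [hg]
        by_cases hC2 : (decide ((s3.length - (buf.length + 2)) / 2 > s1.length.min s2.length)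
              || ((s3.length - (buf.length + 2)) / 2 == s1.length.min s2.length
                   && !(s1.length == s2.length))) = true
        · rw [hC2]; simp
        · rw [Bool.not_eq_true] at hC2
          rw [hC2]
          simp [List.append_assoc]

lemma pvGo_eq (s1 s2 s3 buf : List Char) : pvGoA s1 s2 s3 buf = pvGoB s1 s2 s3 buf := by
  induction s1 generalizing s2 buf with
  | nil =>
    cases s2 with
    | nil => rw [pvGoB_nil_nil]; unfold pvGoA; split <;> simp_all
    | cons b s2 => rw [pvGoB_nil_cons]; rfl
  | cons a s1 ih =>
    cases s2 with
    | nil => rw [pvGoB_cons_nil]; rfl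
    | cons b s2 => rw [pvGoA, pvGoB_cons_cons, ih]

-- ===== VERDICT (by name: the statement is the Claim_ definition above) =====
theorem strings_loosely_interleaved_spec : Claim_equal_strings_loosely_interleaved := by
  intro s1 s2 s3 buf _
  unfold Spec_strings_loosely_interleaved strings_loosely_interleaved strings_loosely_interleaved_alt
  exact pvGo_eq _ _ _ _
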